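-- pv_equiv track=rewrite | github.com/kotama7/ARI | ari-core/ari/viz/server.py | _extract_goal_from_md
-- ===== SOURCE A (Python) =====
-- def _extract_goal_from_md(md: str) -> str:
--     """Extract the Research Goal section body from an experiment.md string.
--
--     Accepts headings like `## Goal`, `## Research Goal`, or any heading
--     containing 'research goal'. Falls back to the first non-empty line
--     (stripped of leading #) when no Goal section is found.
--     """
--     if not md:
--         return ""
--     goal_lines: list[str] = []
--     in_goal = False
--     for line in md.splitlines():
--         s = line.strip()
--         heading = s.lstrip("#").strip().lower() if s.startswith("#") else ""
--         if heading in ("goal", "research goal") or "research goal" in heading: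
--             in_goal = True
--             continue
--         if in_goal:
--             if s.startswith("#"):
--                 break
--             if s:
--                 goal_lines.append(s)
--     if goal_lines:
--         return " ".join(goal_lines)
--     if md.strip():
--         return next((l.lstrip("#").strip() for l in md.splitlines() if l.strip()), "")
--     return ""
-- ===== SOURCE B (Python) =====
-- def _extract_goal_from_md(md: str) -> str:
--     lines = md.splitlines()
--
--     def is_heading(l):
--         return l.strip().startswith("#")
--
--     def is_goal(l):
--         h = l.strip().lstrip("#").strip().lower()
--         return h in ("goal", "research goal") or "research goal" in h
--
--     goal_idxs = [i for i, l in enumerate(lines) if is_heading(l) and is_goal(l)]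
--     goal_lines = []
--     if goal_idxs:
--         after = lines[goal_idxs[0] + 1:]
--         stops = [i for i, l in enumerate(after) if is_heading(l) and not is_goal(l)]
--         region = after[:stops[0]] if stops else after
--         goal_lines = [l.strip() for l in region if l.strip() and not is_heading(l)]
--     if goal_lines:
--         return " ".join(goal_lines)
--     nonempty = [l for l in lines if l.strip()]
--     if nonempty:
--         return nonempty[0].lstrip("#").strip()
--     return ""
-- ===== Notes on version B (the rewrite author's own statement) =====
-- stated objective: alternative
-- what changed: Replaces A's single stateful loop (in_goal flag, continue/break) by an index-based decomposition: find the first goal-heading index by an enumerate comprehension, slice off the lines after it, cut the region at the first non-goal heading index, and filter/map that slice; the fallback uses a filtered list instead of a generator with next().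
import Mathlib
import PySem

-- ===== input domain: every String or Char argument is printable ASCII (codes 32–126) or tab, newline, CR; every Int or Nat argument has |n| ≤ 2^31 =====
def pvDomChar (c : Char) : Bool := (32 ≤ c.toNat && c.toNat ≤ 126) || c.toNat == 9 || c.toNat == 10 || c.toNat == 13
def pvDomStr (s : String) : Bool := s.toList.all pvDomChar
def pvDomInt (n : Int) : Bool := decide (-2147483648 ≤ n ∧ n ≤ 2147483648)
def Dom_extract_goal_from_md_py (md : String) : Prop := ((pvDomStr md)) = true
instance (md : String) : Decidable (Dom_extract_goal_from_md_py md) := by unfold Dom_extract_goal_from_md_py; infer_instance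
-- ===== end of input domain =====

-- B replaces A's stateful flag loop by an index/slice decomposition (find the first goal-heading index, slice off the lines after it, cut at the first non-goal heading index, filter and join); same cost, alternative structure.


-- ===== PORT A =====
-- Python s.lstrip("#"): drop leading '#' characters (exact; PySem has no single-sided stripChars)
def lstripHash (s : String) : String := String.ofList (s.toList.dropWhile (fun c => c == '#'))

-- the `for line in md.splitlines()` loop of A, with its `in_goal` flag and `goal_lines` accumulator
def aGoalLoop : List String → Bool → List String → List String
  | [], _, acc => acc
  | line :: rest, inGoal, acc =>
    let s := PySem.Str.strip line
    let heading := if PySem.Str.startswith s "#" then PySem.Str.lower (PySem.Str.strip (lstripHash s)) else ""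
    if heading == "goal" || heading == "research goal" || PySem.Str.isIn "research goal" heading then
      aGoalLoop rest true acc
    else if inGoal then
      if PySem.Str.startswith s "#" then acc            -- break
      else if !(s == "") then aGoalLoop rest inGoal (acc ++ [s])
      else aGoalLoop rest inGoal acc
    else aGoalLoop rest inGoal acc

def extract_goal_from_md_py (md : String) : String :=
  if md == "" then ""
  else
    let goal_lines := aGoalLoop (PySem.Str.splitlines md) false []
    if !(goal_lines == []) then PySem.Str.join " " goal_lines
    else if !(PySem.Str.strip md == "") then
      -- next((l.lstrip("#").strip() for l in md.splitlines() if l.strip()), "")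
      match (PySem.Str.splitlines md).find? (fun l => !(PySem.Str.strip l == "")) with
      | some l => PySem.Str.strip (lstripHash l)
      | none => ""
    else ""

-- ===== PORT B =====
def bIsHeading (l : String) : Bool := PySem.Str.startswith (PySem.Str.strip l) "#"

def bIsGoal (l : String) : Bool :=
  let h := PySem.Str.lower (PySem.Str.strip (lstripHash (PySem.Str.strip l)))
  h == "goal" || h == "research goal" || PySem.Str.isIn "research goal" h

def extract_goal_from_md_py_alt (md : String) : String :=
  let lines := PySem.Str.splitlines md
  let goalIdxs := ((PySem.List.enumerate lines).filter (fun p => bIsHeading p.2 && bIsGoal p.2)).map (fun p => p.1)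
  let goal_lines : List String :=
    match goalIdxs with
    | [] => []
    | i :: _ =>
      let after := PySem.List.slice lines (some (i + 1)) none
      let stops := ((PySem.List.enumerate after).filter (fun p => bIsHeading p.2 && !bIsGoal p.2)).map (fun p => p.1)
      let region := match stops with
        | [] => after
        | j :: _ => PySem.List.slice after none (some j)
      (region.filter (fun l => !(PySem.Str.strip l == "") && !bIsHeading l)).map PySem.Str.strip
  if !(goal_lines == []) then PySem.Str.join " " goal_lines
  else
    match lines.filter (fun l => !(PySem.Str.strip l == "")) with
    | [] => ""
    | l :: _ => PySem.Str.strip (lstripHash l)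

-- ===== PRECONDITION & SPEC =====
def Spec_extract_goal_from_md_py (md : String) (out : String) : Prop := out = extract_goal_from_md_py_alt md
instance (md : String) (out : String) : Decidable (Spec_extract_goal_from_md_py md out) := by unfold Spec_extract_goal_from_md_py; infer_instance

-- ===== CLAIM (what is proved, stated in full; the proofs are below) =====
def Claim_equal_extract_goal_from_md_py : Prop := ∀ (md : String), Dom_extract_goal_from_md_py md → Spec_extract_goal_from_md_py md (extract_goal_from_md_py md)

-- ===== LEMMAS AND PROOFS =====
def isG (l : String) : Bool := bIsHeading l && bIsGoal l
def isStop (l : String) : Bool := bIsHeading l && !bIsGoal l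

def gcollect : List String → List String
  | [] => []
  | l :: rest =>
    if isG l then gcollect rest
    else if bIsHeading l then []
    else if !(PySem.Str.strip l == "") then PySem.Str.strip l :: gcollect rest
    else gcollect rest

def gsearch : List String → List String
  | [] => []
  | l :: rest => if isG l then gcollect rest else gsearch rest

lemma acond (line : String) :
    ((if PySem.Str.startswith (PySem.Str.strip line) "#" then PySem.Str.lower (PySem.Str.strip (lstripHash (PySem.Str.strip line))) else "") == "goal" ||
     (if PySem.Str.startswith (PySem.Str.strip line) "#" then PySem.Str.lower (PySem.Str.strip (lstripHash (PySem.Str.strip line))) else "") == "research goal" ||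
     PySem.Str.isIn "research goal" (if PySem.Str.startswith (PySem.Str.strip line) "#" then PySem.Str.lower (PySem.Str.strip (lstripHash (PySem.Str.strip line))) else "")) = isG line := by
  simp only [isG, bIsHeading, bIsGoal]
  by_cases h : PySem.Str.startswith (PySem.Str.strip line) "#" = true
  · simp only [h, if_true, PySem.Str.startswith_eq, PySem.Str.toList_strip] at *
    simp [h]
  · rw [Bool.not_eq_true] at h
    simp only [h, if_false, Bool.false_and]
    rw [PySem.Str.startswith_eq, PySem.Str.toList_strip] at h
    simp [h]
    decide

lemma aLoop_true (lines : List String) : ∀ acc, aGoalLoop lines true acc = acc ++ gcollect lines := by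
  induction lines with
  | nil => intro acc; simp [aGoalLoop, gcollect]
  | cons l rest ih =>
    intro acc
    show (if _ then _ else _) = _
    rw [gcollect, acond]
    by_cases hg : isG l = true
    · simp only [hg, if_true]; exact ih acc
    · rw [Bool.not_eq_true] at hg
      simp only [hg, Bool.false_eq_true, if_false, if_true]
      by_cases hh : bIsHeading l = true
      · simp only [bIsHeading, PySem.Str.startswith_eq, PySem.Str.toList_strip] at hh
        have hh2 : PySem.Chars.startswith (PySem.Chars.strip l.toList) ['#'] = true := hh
        have hb : bIsHeading l = true := by
          rw [bIsHeading, PySem.Str.startswith_eq, PySem.Str.toList_strip]; exact hh2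
        simp [hh2, hb]
      · rw [Bool.not_eq_true] at hh
        have hh' := hh
        simp only [bIsHeading, PySem.Str.startswith_eq, PySem.Str.toList_strip] at hh'
        have hh2 : PySem.Chars.startswith (PySem.Chars.strip l.toList) ['#'] = false := hh'
        simp only [hh2, Bool.false_eq_true, if_false, hh]
        by_cases hs : (PySem.Str.strip l == "") = true
        · simp [hs, ih, hh2]
        · rw [Bool.not_eq_true] at hs
          simp [hs, ih, hh2]

lemma aLoop_false (lines : List String) : ∀ acc, aGoalLoop lines false acc = acc ++ gsearch lines := by
  induction lines with
  | nil => intro acc; simp [aGoalLoop, gsearch]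
  | cons l rest ih =>
    intro acc
    show (if _ then _ else _) = _
    rw [gsearch, acond]
    by_cases hg : isG l = true
    · simp only [hg, if_true]; exact aLoop_true rest acc
    · rw [Bool.not_eq_true] at hg
      simp only [hg, Bool.false_eq_true, if_false]
      exact ih acc


lemma enum_filter_head (p : String → Bool) : ∀ (xs : List String) (k : Int),
    (((PySem.List.enumerate xs k).filter (fun q => p q.2)).map (fun q => q.1)).head? =
    (List.findIdx? p xs).map (fun n => k + (n : Int)) := by
  intro xs
  induction xs with
  | nil => intro k; simp [PySem.List.enumerate]
  | cons x xs ih =>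
    intro k
    rw [PySem.List.enumerate_cons, List.findIdx?_cons]
    by_cases hp : p x = true
    · simp [hp]
    · rw [Bool.not_eq_true] at hp
      simp only [List.filter_cons, hp, Bool.false_eq_true, if_false, ih (k + 1)]
      cases h : List.findIdx? p xs with
      | none => simp [h]
      | some n => simp [h]; push_cast; ring

lemma gsearch_eq (lines : List String) :
    gsearch lines = (match List.findIdx? isG lines with
      | none => []
      | some n => gcollect (lines.drop (n + 1))) := by
  induction lines with
  | nil => simp [gsearch]
  | cons l rest ih =>
    rw [gsearch, List.findIdx?_cons]
    by_cases hg : isG l = true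
    · simp [hg]
    · rw [Bool.not_eq_true] at hg
      simp only [hg, Bool.false_eq_true, if_false, ih]
      cases h : List.findIdx? isG rest with
      | none => simp
      | some n => simp [List.drop_succ_cons]

lemma gcollect_eq (xs : List String) :
    gcollect xs = ((match List.findIdx? isStop xs with
      | none => xs
      | some m => xs.take m).filter (fun l => !(PySem.Str.strip l == "") && !bIsHeading l)).map PySem.Str.strip := by
  induction xs with
  | nil => simp [gcollect]
  | cons l rest ih =>
    rw [gcollect, List.findIdx?_cons]
    by_cases hstop : isStop l = true
    · have hh : bIsHeading l = true := by
        have := hstop; rw [isStop, Bool.and_eq_true] at this; exact this.1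
      have hng : bIsGoal l = false := by
        have := hstop; rw [isStop, Bool.and_eq_true] at this; simpa using this.2
      have hgf : isG l = false := by rw [isG, hng]; simp
      simp [hstop, hgf, hh]
    · rw [Bool.not_eq_true] at hstop
      have hregion : (match Option.map (fun i => i + 1) (List.findIdx? isStop rest) with
          | none => l :: rest
          | some m => List.take m (l :: rest)) =
          l :: (match List.findIdx? isStop rest with
          | none => rest
          | some m => List.take m rest) := by
        cases h : List.findIdx? isStop rest with
        | none => simp
        | some n => simp [List.take_succ_cons]
      simp only [hstop, Bool.false_eq_true, if_false, hregion]
      by_cases hh : bIsHeading l = true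
      · have hgoal : bIsGoal l = true := by
          by_contra hc
          rw [Bool.not_eq_true] at hc
          rw [isStop, hh, hc] at hstop; simp at hstop
        have hg : isG l = true := by rw [isG, hh, hgoal]; rfl
        simp [hg, hh, ih]
      · rw [Bool.not_eq_true] at hh
        have hg : isG l = false := by rw [isG, hh]; simp
        simp only [hg, Bool.false_eq_true, if_false, hh]
        by_cases hs : (PySem.Str.strip l == "") = true
        · simp [hs, ih]
        · rw [Bool.not_eq_true] at hs
          rw [ih, List.filter_cons_of_pos (by simp [hs, hh]), List.map_cons]
          simp [hs]

lemma strip_nil_iff (cs : List Char) : PySem.Chars.strip cs = [] ↔ ∀ c ∈ cs, PySem.Chars.isspace c = true := by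
  rw [PySem.Chars.strip, PySem.Chars.rstrip, PySem.Chars.lstrip]
  rw [List.reverse_eq_nil_iff, List.dropWhile_eq_nil_iff]
  constructor
  · intro h c hc
    rcases List.mem_append.mp ((List.takeWhile_append_dropWhile (p := PySem.Chars.isspace) (l := cs)) ▸ hc) with h1 | h1
    · exact List.mem_takeWhile_imp h1
    · exact h c (List.mem_reverse.mpr h1)
  · intro h c hc
    exact h c ((List.dropWhile_sublist _).subset (List.mem_reverse.mp hc))

lemma splitlines_go_mem (isB : Char → Bool) :
    ∀ (s cur : List Char) (acc : List (List Char)) (l : List Char),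
      l ∈ PySem.Chars.splitlines.go isB s cur acc →
      ∀ c ∈ l, c ∈ s ∨ c ∈ cur ∨ ∃ m ∈ acc, c ∈ m := by
  intro s cur acc
  induction s, cur, acc using PySem.Chars.splitlines.go.induct isB with
  | case1 cur acc hcur =>
    intro l hl c hc
    rw [PySem.Chars.splitlines.go] at hl
    simp only [hcur, if_true, List.mem_reverse] at hl
    exact Or.inr (Or.inr ⟨l, hl, hc⟩)
  | case2 cur acc hcur =>
    intro l hl c hc
    rw [PySem.Chars.splitlines.go] at hl
    simp [hcur] at hl
    rcases hl with h | h
    · exact Or.inr (Or.inr ⟨l, h, hc⟩)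
    · subst h; exact Or.inr (Or.inl (List.mem_reverse.mp hc))
  | case3 rest cur acc ih =>
    intro l hl c hc
    rw [PySem.Chars.splitlines.go] at hl
    rcases ih l hl c hc with h | h | ⟨m, hm, hcm⟩
    · exact Or.inl (by simp [h])
    · simp at h
    · rcases List.mem_cons.mp hm with h1 | h1
      · subst h1; exact Or.inr (Or.inl (List.mem_reverse.mp hcm))
      · exact Or.inr (Or.inr ⟨m, h1, hcm⟩)
  | case4 c0 rest cur acc hne hb ih =>
    intro l hl c hc
    rw [PySem.Chars.splitlines.go] at hl
    · simp only [hb, if_true] at hl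
      rcases ih l hl c hc with h | h | ⟨m, hm, hcm⟩
      · exact Or.inl (List.mem_cons_of_mem _ h)
      · simp at h
      · rcases List.mem_cons.mp hm with h1 | h1
        · subst h1; exact Or.inr (Or.inl (List.mem_reverse.mp hcm))
        · exact Or.inr (Or.inr ⟨m, h1, hcm⟩)
    · exact hne
  | case5 c0 rest cur acc hne hb ih =>
    intro l hl c hc
    rw [PySem.Chars.splitlines.go] at hl
    · rw [Bool.not_eq_true] at hb
      simp only [hb, Bool.false_eq_true, if_false] at hl
      rcases ih l hl c hc with h | h | ⟨m, hm, hcm⟩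
      · exact Or.inl (List.mem_cons_of_mem _ h)
      · rcases List.mem_cons.mp h with h1 | h1
        · subst h1; exact Or.inl (List.mem_cons_self)
        · exact Or.inr (Or.inl h1)
      · exact Or.inr (Or.inr ⟨m, hm, hcm⟩)
    · exact hne

lemma line_strip_nil (md l : String) (hl : l ∈ PySem.Str.splitlines md)
    (h : PySem.Str.strip md = "") : PySem.Str.strip l = "" := by
  have hall : ∀ c ∈ md.toList, PySem.Chars.isspace c = true := by
    rw [← strip_nil_iff, ← PySem.Str.toList_strip, h]
    rfl
  have hlmem : l.toList ∈ PySem.Chars.splitlines md.toList := by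
    rw [← PySem.Str.splitlines_map_toList]
    exact List.mem_map_of_mem hl
  rw [PySem.Chars.splitlines] at hlmem
  have hmem := splitlines_go_mem _ md.toList [] [] l.toList hlmem
  have hls : ∀ c ∈ l.toList, PySem.Chars.isspace c = true := by
    intro c hc
    rcases hmem c hc with h1 | h1 | ⟨m, hm, _⟩
    · exact hall c h1
    · simp at h1
    · simp at hm
  have h2 : (PySem.Str.strip l).toList = [] := by
    rw [PySem.Str.toList_strip, strip_nil_iff]; exact hls
  exact String.toList_eq_nil_iff.mp h2

lemma b_goal_lines (lines : List String) :
    (match ((PySem.List.enumerate lines 0).filter (fun p => bIsHeading p.2 && bIsGoal p.2)).map (fun p => p.1) with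
     | [] => ([] : List String)
     | i :: _ =>
       let after := PySem.List.slice lines (some (i + 1)) none
       let stops := ((PySem.List.enumerate after 0).filter (fun p => bIsHeading p.2 && !bIsGoal p.2)).map (fun p => p.1)
       let region := match stops with
         | [] => after
         | j :: _ => PySem.List.slice after none (some j)
       (region.filter (fun l => !(PySem.Str.strip l == "") && !bIsHeading l)).map PySem.Str.strip)
    = gsearch lines := by
  have h0 := enum_filter_head (fun l => bIsHeading l && bIsGoal l) lines 0
  rw [gsearch_eq]
  cases hgi : ((PySem.List.enumerate lines 0).filter (fun p => bIsHeading p.2 && bIsGoal p.2)).map (fun p => p.1) with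
  | nil =>
    rw [hgi] at h0
    have : List.findIdx? (fun l => bIsHeading l && bIsGoal l) lines = none := by
      cases h : List.findIdx? (fun l => bIsHeading l && bIsGoal l) lines with
      | none => rfl
      | some n => rw [h] at h0; simp at h0
    have hG : List.findIdx? isG lines = none := this
    rw [hG]
  | cons i tl =>
    rw [hgi] at h0
    cases h : List.findIdx? (fun l => bIsHeading l && bIsGoal l) lines with
    | none => rw [h] at h0; simp at h0
    | some n =>
      rw [h] at h0
      simp only [List.head?_cons, Option.map_some, zero_add] at h0
      have hi : i = (n : Int) := by injection h0
      have hG : List.findIdx? isG lines = some n := h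
      rw [hG]
      simp only [hi]
      have hafter : PySem.List.slice lines (some ((n : Int) + 1)) none = lines.drop (n + 1) := by
        rw [PySem.List.slice_from lines (a := (n : Int) + 1) (by omega),
          show ((n : Int) + 1).toNat = n + 1 by omega]
      rw [hafter]
      have h1 := enum_filter_head (fun l => bIsHeading l && !bIsGoal l) (lines.drop (n + 1)) 0
      cases hst : ((PySem.List.enumerate (lines.drop (n + 1)) 0).filter (fun p => bIsHeading p.2 && !bIsGoal p.2)).map (fun p => p.1) with
      | nil =>
        rw [hst] at h1
        have hS : List.findIdx? isStop (lines.drop (n + 1)) = none := by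
          cases h2 : List.findIdx? (fun l => bIsHeading l && !bIsGoal l) (lines.drop (n + 1)) with
          | none => exact h2
          | some m => rw [h2] at h1; simp at h1
        rw [gcollect_eq, hS]
      | cons j tl2 =>
        rw [hst] at h1
        cases h2 : List.findIdx? (fun l => bIsHeading l && !bIsGoal l) (lines.drop (n + 1)) with
        | none => rw [h2] at h1; simp at h1
        | some m =>
          rw [h2] at h1
          simp only [List.head?_cons, Option.map_some, zero_add] at h1
          have hj : j = (m : Int) := by injection h1
          have hS : List.findIdx? isStop (lines.drop (n + 1)) = some m := h2
          rw [gcollect_eq, hS]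
          simp only [hj]
          rw [PySem.List.slice_to (lines.drop (n + 1)) (b := (m : Int)) (by omega),
            Int.toNat_natCast]

theorem ab_eq (md : String) :
    extract_goal_from_md_py md = extract_goal_from_md_py_alt md := by
  by_cases hmd : md = ""
  · subst hmd; rfl
  · unfold extract_goal_from_md_py extract_goal_from_md_py_alt
    have hne : (md == "") = false := by simp [hmd]
    simp only [hne, Bool.false_eq_true, if_false]
    rw [aLoop_false (PySem.Str.splitlines md) []]
    simp only [List.nil_append]
    rw [b_goal_lines (PySem.Str.splitlines md)]
    by_cases hgl : gsearch (PySem.Str.splitlines md) = []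
    · simp only [hgl, BEq.rfl, Bool.not_true, Bool.false_eq_true, if_false]
      rw [← List.head?_filter]
      by_cases hstrip : PySem.Str.strip md = ""
      · have hfil : (PySem.Str.splitlines md).filter (fun l => !(PySem.Str.strip l == "")) = [] := by
          rw [List.filter_eq_nil_iff]
          intro l hl
          simp [line_strip_nil md l hl hstrip]
        simp [hstrip, hfil]
      · have hs2 : (PySem.Str.strip md == "") = false := by simp [hstrip]
        simp only [hs2, Bool.not_false, if_true]
        cases hfil : (PySem.Str.splitlines md).filter (fun l => !(PySem.Str.strip l == "")) with
        | nil => simp [hfil]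
        | cons l tl => simp [hfil]
    · have : (gsearch (PySem.Str.splitlines md) == []) = false := by simp [hgl]
      rw [this]
      simp

-- ===== VERDICT (by name: the statement is the Claim_ definition above) =====
theorem extract_goal_from_md_py_spec : Claim_equal_extract_goal_from_md_py := by
  intro md _
  unfold Spec_extract_goal_from_md_py
  exact ab_eq md
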